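-- pv_equiv track=rewrite | github.com/mofa-org/mofa-fm | backend/apps/podcasts/services/rss_ingest.py | _items_to_reference_text
-- ===== SOURCE A (Python) =====
-- from typing import Dict, List, Tuple
--
-- def _items_to_reference_text(feed_title: str, items: List[Dict[str, str]]) -> str:
--     lines = [f"来源：{feed_title}", ""]
--     for idx, item in enumerate(items, start=1):
--         lines.append(f"{idx}. 标题：{item['title']}")
--         if item.get("description"):
--             lines.append(f"摘要：{item['description']}")
--         if item.get("published"):
--             lines.append(f"发布时间：{item['published']}")
--         if item.get("link"):
--             lines.append(f"链接：{item['link']}")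
--         lines.append("")
--     return "\n".join(lines).strip()
-- ===== SOURCE B (Python) =====
-- def _items_to_reference_text(feed_title, items):
--     def rec(idx, rest):
--         if not rest:
--             return ""
--         item = rest[0]
--         lines = [f"{idx}. 标题：{item['title']}"] + [
--             f"{label}：{value}"
--             for label, value in (
--                 ("摘要", item.get("description")),
--                 ("发布时间", item.get("published")),
--                 ("链接", item.get("link")),
--             )
--             if value
--         ]
--         return "\n\n" + "\n".join(lines) + rec(idx + 1, rest[1:])
--
--     return (f"来源：{feed_title}" + rec(1, items)).strip()
-- ===== Notes on version B (the rewrite author's own statement) =====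
-- stated objective: alternative
-- what changed: B replaces A's iterative flat-line-list accumulator (with sentinel empty lines, enumerate and a final join) by a recursive function that builds the suffix text for the remaining items directly by string concatenation with explicit '\n\n' separators, and selects optional fields by filtering a (label, value) pair tuple by truthiness instead of per-field if-appends.
import Mathlib
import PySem

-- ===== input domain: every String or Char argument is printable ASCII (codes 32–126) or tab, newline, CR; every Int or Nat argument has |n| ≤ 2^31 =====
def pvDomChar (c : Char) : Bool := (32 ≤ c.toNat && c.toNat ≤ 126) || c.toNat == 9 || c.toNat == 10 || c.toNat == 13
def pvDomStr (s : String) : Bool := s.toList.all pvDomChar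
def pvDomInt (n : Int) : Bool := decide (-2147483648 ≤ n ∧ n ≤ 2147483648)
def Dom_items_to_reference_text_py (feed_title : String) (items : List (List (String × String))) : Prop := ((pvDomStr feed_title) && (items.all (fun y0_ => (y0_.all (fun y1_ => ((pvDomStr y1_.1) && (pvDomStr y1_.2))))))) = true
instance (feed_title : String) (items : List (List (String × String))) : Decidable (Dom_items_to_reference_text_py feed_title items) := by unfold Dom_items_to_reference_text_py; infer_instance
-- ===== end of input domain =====

-- B builds the output recursively: a recursive function returns the suffix text for the remaining items
-- directly by string concatenation with explicit "\n\n" separators, selecting optional fields by filtering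
-- a (label, value) table by truthiness; this replaces A's iterative flat line-list with sentinel empty
-- lines, enumerate and a final join. Objective: alternative decomposition, not faster.


-- dict.get(k) as first-match lookup on the association list (none = key absent, Python's None).
def pvGet? (item : List (String × String)) (k : String) : Option String :=
  (item.find? (fun p => p.1 == k)).map (·.2)

-- dict.get(k) collapsed to "" for absent keys; "" doubles as Python's falsy None/"" (titles are present by Pre_).
def pvGetD (item : List (String × String)) (k : String) : String :=
  (pvGet? item k).getD ""

-- ===== PORT A =====
def items_to_reference_text_py (feed_title : String) (items : List (List (String × String))) : String :=
  let st := items.foldl (fun (st : List String × Int) item =>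
    let ls := st.1 ++ [PySem.Int.toStr st.2 ++ ". 标题：" ++ pvGetD item "title"]
    let ls := if pvGetD item "description" ≠ "" then ls ++ ["摘要：" ++ pvGetD item "description"] else ls
    let ls := if pvGetD item "published" ≠ "" then ls ++ ["发布时间：" ++ pvGetD item "published"] else ls
    let ls := if pvGetD item "link" ≠ "" then ls ++ ["链接：" ++ pvGetD item "link"] else ls
    (ls ++ [""], st.2 + 1)) (["来源：" ++ feed_title, ""], 1)
  PySem.Str.strip (PySem.Str.join "\n" st.1)

-- ===== PORT B =====
-- the item's lines: title line plus the truthy entries of the (label, value) table (B's comprehension)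
def pvAltLines (idx : Int) (item : List (String × String)) : List String :=
  (PySem.Int.toStr idx ++ ". 标题：" ++ pvGetD item "title") ::
  ([("摘要", pvGet? item "description"), ("发布时间", pvGet? item "published"), ("链接", pvGet? item "link")].filterMap
    (fun lv => match lv.2 with
      | some v => if v ≠ "" then some (lv.1 ++ "：" ++ v) else none
      | none => none))

-- B's inner rec: the suffix text contributed by the remaining items, built by direct concatenation
def pvRecAlt (idx : Int) : List (List (String × String)) → String
  | [] => ""
  | item :: rest => "\n\n" ++ PySem.Str.join "\n" (pvAltLines idx item) ++ pvRecAlt (idx + 1) rest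

def items_to_reference_text_py_alt (feed_title : String) (items : List (List (String × String))) : String :=
  PySem.Str.strip ("来源：" ++ feed_title ++ pvRecAlt 1 items)

-- ===== PRECONDITION & SPEC =====
-- Pre_ excludes items lacking a "title" key, on which Python A raises KeyError.
def Pre_items_to_reference_text_py (feed_title : String) (items : List (List (String × String))) : Prop :=
  (items.all (fun item => item.any (fun p => p.1 == "title"))) = true
instance (feed_title : String) (items : List (List (String × String))) : Decidable (Pre_items_to_reference_text_py feed_title items) := by unfold Pre_items_to_reference_text_py; infer_instance

def pvWitness_items_to_reference_text_py : String × (List (List (String × String))) :=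
  ("My Feed", [[("title", "a")], [("title", "b"), ("link", "http://x")]])

def Spec_items_to_reference_text_py (feed_title : String) (items : List (List (String × String))) (out : String) : Prop := out = items_to_reference_text_py_alt feed_title items
instance (feed_title : String) (items : List (List (String × String))) (out : String) : Decidable (Spec_items_to_reference_text_py feed_title items out) := by unfold Spec_items_to_reference_text_py; infer_instance

-- ===== CLAIM (what is proved, stated in full; the proofs are below) =====
def Claim_equal_items_to_reference_text_py : Prop := ∀ (feed_title : String) (items : List (List (String × String))), Dom_items_to_reference_text_py feed_title items → Pre_items_to_reference_text_py feed_title items → Spec_items_to_reference_text_py feed_title items (items_to_reference_text_py feed_title items)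

-- ===== LEMMAS AND PROOFS =====

-- the lines A appends for one item (title line plus the guarded optional lines)
def pvItemLines (idx : Int) (item : List (String × String)) : List String :=
  [PySem.Int.toStr idx ++ ". 标题：" ++ pvGetD item "title"]
  ++ (if pvGetD item "description" ≠ "" then ["摘要：" ++ pvGetD item "description"] else [])
  ++ (if pvGetD item "published" ≠ "" then ["发布时间：" ++ pvGetD item "published"] else [])
  ++ (if pvGetD item "link" ≠ "" then ["链接：" ++ pvGetD item "link"] else [])

-- A's flat tail lines for the remaining items, starting at index idx
def pvTails (idx : Int) : List (List (String × String)) → List String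
  | [] => []
  | it :: rest => pvItemLines idx it ++ [""] ++ pvTails (idx + 1) rest

theorem foldA_spec (items : List (List (String × String))) :
    ∀ (ls : List String) (i : Int),
      items.foldl (fun (st : List String × Int) item =>
        let ls := st.1 ++ [PySem.Int.toStr st.2 ++ ". 标题：" ++ pvGetD item "title"]
        let ls := if pvGetD item "description" ≠ "" then ls ++ ["摘要：" ++ pvGetD item "description"] else ls
        let ls := if pvGetD item "published" ≠ "" then ls ++ ["发布时间：" ++ pvGetD item "published"] else ls
        let ls := if pvGetD item "link" ≠ "" then ls ++ ["链接：" ++ pvGetD item "link"] else ls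
        (ls ++ [""], st.2 + 1)) (ls, i)
      = (ls ++ pvTails i items, i + items.length) := by
  induction items with
  | nil => intro ls i; simp [pvTails]
  | cons it rest ih =>
    intro ls i
    simp only [List.foldl_cons, ih, pvTails, pvItemLines, Prod.mk.injEq]
    refine ⟨?_, by simp; omega⟩
    split_ifs <;> simp

-- B's table comprehension produces exactly A's guarded optional lines
theorem pvAltLines_eq (idx : Int) (item : List (String × String)) :
    pvAltLines idx item = pvItemLines idx item := by
  simp only [pvAltLines, pvItemLines, List.filterMap_cons, List.filterMap_nil]
  have hd : pvGetD item "description" = (pvGet? item "description").getD "" := rfl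
  have hp : pvGetD item "published" = (pvGet? item "published").getD "" := rfl
  have hl : pvGetD item "link" = (pvGet? item "link").getD "" := rfl
  cases hgd : pvGet? item "description" <;> cases hgp : pvGet? item "published" <;>
    cases hgl : pvGet? item "link" <;>
    simp only [hd, hp, hl, hgd, hgp, hgl, Option.getD_some, Option.getD_none] <;>
    split_ifs <;> simp_all

theorem join_append_of_ne_nil (sep : List Char) (xs ys : List (List Char)) (hx : xs ≠ []) (hy : ys ≠ []) :
    PySem.Chars.join sep (xs ++ ys) = PySem.Chars.join sep xs ++ sep ++ PySem.Chars.join sep ys := by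
  induction xs with
  | nil => exact absurd rfl hx
  | cons x xs ih =>
    cases xs with
    | nil =>
      cases ys with
      | nil => exact absurd rfl hy
      | cons y ys => simp [PySem.Chars.join_cons_cons, PySem.Chars.join_singleton]
    | cons x2 xs2 =>
      have := ih (by simp)
      simp only [List.cons_append] at this ⊢
      rw [PySem.Chars.join_cons_cons, PySem.Chars.join_cons_cons, this]
      simp

theorem rstrip_append_space (xs : List Char) (c : Char) (h : PySem.Chars.isspace c = true) :
    PySem.Chars.rstrip (xs ++ [c]) = PySem.Chars.rstrip xs := by
  simp [PySem.Chars.rstrip, h]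

theorem strip_append_newline (xs : List Char) :
    PySem.Chars.strip (xs ++ ['\n']) = PySem.Chars.strip xs := by
  have hnl : PySem.Chars.isspace '\n' = true := by decide
  simp only [PySem.Chars.strip, PySem.Chars.lstrip, List.dropWhile_append]
  by_cases h : (xs.dropWhile PySem.Chars.isspace).isEmpty
  · simp [hnl, PySem.Chars.rstrip, List.isEmpty_iff.mp h]
  · simp only [h]
    exact rstrip_append_space _ _ hnl

theorem pvTails_ne_nil (i : Int) (it : List (String × String)) (rest : List (List (String × String))) :
    pvTails i (it :: rest) ≠ [] := by
  simp [pvTails, pvItemLines]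

theorem join_append_empty_last (sep : List Char) (xs : List (List Char)) (hx : xs ≠ []) :
    PySem.Chars.join sep (xs ++ [[]]) = PySem.Chars.join sep xs ++ sep := by
  rw [join_append_of_ne_nil sep xs [[]] hx (by simp)]
  simp [PySem.Chars.join_singleton]

-- B's recursive suffix (plus a trailing newline) spells out A's flat tail lines joined by "\n",
-- prefixed by the two newlines of the blank separator line
theorem rec_tails_spec (items : List (List (String × String))) :
    items ≠ [] → ∀ (i : Int),
      (pvRecAlt i items).toList ++ ['\n']
      = '\n' :: '\n' :: PySem.Chars.join ['\n'] ((pvTails i items).map String.toList) := by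
  induction items with
  | nil => intro h; exact absurd rfl h
  | cons it rest ih =>
    intro _ i
    have hsep : ("\n" : String).toList = ['\n'] := rfl
    have hblk : (PySem.Str.join "\n" (pvAltLines i it)).toList
        = PySem.Chars.join ['\n'] ((pvItemLines i it).map String.toList) := by
      rw [pvAltLines_eq, PySem.Str.toList_join, hsep]
    cases rest with
    | nil =>
      simp only [pvRecAlt, pvTails, List.append_nil, List.map_append, List.map_cons, List.map_nil,
        show ("" : String).toList = [] from rfl, String.toList_append, hblk,
        show ("\n\n" : String).toList = ['\n', '\n'] from rfl]
      rw [join_append_empty_last _ _ (by simp [pvItemLines])]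
      simp
    | cons it2 rest2 =>
      have htail := ih (by simp) (i + 1)
      have hne2 := pvTails_ne_nil (i + 1) it2 rest2
      rw [show pvTails i (it :: it2 :: rest2)
            = pvItemLines i it ++ ([""] ++ pvTails (i + 1) (it2 :: rest2)) by
          rw [pvTails]; simp]
      obtain ⟨t, ts, ht⟩ : ∃ t ts,
          (pvTails (i + 1) (it2 :: rest2)).map String.toList = t :: ts := by
        cases h : (pvTails (i + 1) (it2 :: rest2)).map String.toList with
        | nil => exact absurd (List.map_eq_nil_iff.mp h) hne2
        | cons t ts => exact ⟨t, ts, rfl⟩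
      rw [List.map_append,
        join_append_of_ne_nil _ _ _ (by simp [pvItemLines]) (by simp),
        List.map_append, show (([""] : List String).map String.toList) = [([] : List Char)] from rfl,
        show ([([] : List Char)] ++ (pvTails (i + 1) (it2 :: rest2)).map String.toList)
          = [] :: (pvTails (i + 1) (it2 :: rest2)).map String.toList by simp,
        ht, PySem.Chars.join_cons_cons, ← ht]
      rw [show pvRecAlt i (it :: it2 :: rest2)
            = "\n\n" ++ PySem.Str.join "\n" (pvAltLines i it) ++ pvRecAlt (i + 1) (it2 :: rest2) from rfl]
      simp only [String.toList_append, hblk,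
        show ("\n\n" : String).toList = ['\n', '\n'] from rfl, List.append_assoc, htail]
      simp

theorem strip_congr_newline (x y : String) (h : x.toList = y.toList ++ ['\n']) :
    PySem.Str.strip x = PySem.Str.strip y := by
  simp only [PySem.Str.strip, h, strip_append_newline]

-- ===== VERDICT (by name: the statement is the Claim_ definition above) =====
theorem items_to_reference_text_py_spec : Claim_equal_items_to_reference_text_py := by
  intro ft items _ _
  show items_to_reference_text_py ft items = items_to_reference_text_py_alt ft items
  simp only [items_to_reference_text_py, items_to_reference_text_py_alt]
  rw [foldA_spec]
  have hsep : ("\n" : String).toList = ['\n'] := rfl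
  cases items with
  | nil =>
    apply strip_congr_newline
    simp [PySem.Str.toList_join, hsep, pvTails, pvRecAlt, PySem.Chars.join_cons_cons,
      PySem.Chars.join_singleton]
  | cons it rest =>
    apply strip_congr_newline
    rw [PySem.Str.toList_join, hsep]
    have htails := rec_tails_spec (it :: rest) (by simp) 1
    have hne := pvTails_ne_nil (1 : Int) it rest
    rw [List.map_append,
      join_append_of_ne_nil _ _ _ (by simp) (by simpa using hne)]
    rw [show (["来源：" ++ ft, ""].map String.toList)
          = [("来源：" ++ ft).toList, []] from rfl,
      PySem.Chars.join_cons_cons, PySem.Chars.join_singleton]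
    simp only [String.toList_append, List.append_assoc, htails]
    simp
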